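-- pv_equiv track=rewrite | github.com/StackPie71/LINGI2364-Mining-Patterns | Mining Patterns/pade.py | get_itemset
-- ===== SOURCE A (Python) =====
-- def get_itemset(datas) :
--     """ This function permit to obtain all items present in the data file.
--
--     Argmuents :
--         * datas : All the datas from the file considered
--
--     Return :
--         * itemset : The set of all items
--
--     """
--     itemset = []
--     for line in datas :
--         #index = -1
--         if len(line) > 1 :
--             if line[0] not in itemset :
--                 itemset.append(line[0])
--     itemset = sorted(itemset)
--     return itemset
-- ===== SOURCE B (Python) =====
-- def get_itemset(datas):
--     """Maintain a sorted, duplicate-free itemset by ordered insertion: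
--     each first item is inserted into its sorted position recursively,
--     skipping it if already present.  No final sort, no membership scan."""
--     def insert(sorted_xs, x):
--         if not sorted_xs:
--             return [x]
--         h = sorted_xs[0]
--         if x < h:
--             return [x] + sorted_xs
--         if x == h:
--             return sorted_xs
--         return [h] + insert(sorted_xs[1:], x)
--     itemset = []
--     for line in datas:
--         if len(line) > 1:
--             itemset = insert(itemset, line[0])
--     return itemset
-- ===== Notes on version B (the rewrite author's own statement) =====
-- stated objective: alternative
-- what changed: Replaces A's append-with-membership-scan plus final sort by an insertion-sort-style algorithm that keeps the itemset sorted and duplicate-free at all times via recursive ordered insertion.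
import Mathlib
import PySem

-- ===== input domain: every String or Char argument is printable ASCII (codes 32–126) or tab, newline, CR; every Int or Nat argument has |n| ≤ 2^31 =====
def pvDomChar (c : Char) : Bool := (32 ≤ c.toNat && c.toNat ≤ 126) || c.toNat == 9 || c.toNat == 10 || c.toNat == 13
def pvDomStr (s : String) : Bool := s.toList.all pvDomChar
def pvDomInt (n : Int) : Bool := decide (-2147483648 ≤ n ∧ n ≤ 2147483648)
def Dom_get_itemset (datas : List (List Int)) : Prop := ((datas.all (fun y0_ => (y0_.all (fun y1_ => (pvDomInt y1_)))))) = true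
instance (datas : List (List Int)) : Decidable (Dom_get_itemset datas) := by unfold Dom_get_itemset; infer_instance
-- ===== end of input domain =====

-- B keeps the itemset sorted and duplicate-free at all times via recursive ordered insertion,
-- instead of A's append-after-membership-scan followed by a final sort (alternative algorithm, same result).

-- ===== PORT A =====
-- itemset accumulated with a membership test, then sorted
def get_itemset (datas : List (List Int)) : List Int :=
  let itemset := datas.foldl (fun acc line =>
    if 1 < line.length then
      if line.headI ∈ acc then acc else acc ++ [line.headI]
    else acc) []
  PySem.List.sorted itemset (fun x => x) false

-- ===== PORT B =====
-- recursive ordered insert into a sorted duplicate-free list (Source B's inner `insert`)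
def pvInsert (x : Int) : List Int → List Int
  | [] => [x]
  | h :: t => if x < h then x :: h :: t else if x = h then h :: t else h :: pvInsert x t

def get_itemset_alt (datas : List (List Int)) : List Int :=
  datas.foldl (fun itemset line =>
    if 1 < line.length then pvInsert line.headI itemset else itemset) []

-- ===== PRECONDITION & SPEC =====
def Spec_get_itemset (datas : List (List Int)) (out : List Int) : Prop := out = get_itemset_alt datas
instance (datas : List (List Int)) (out : List Int) : Decidable (Spec_get_itemset datas out) := by unfold Spec_get_itemset; infer_instance

-- ===== CLAIM (what is proved, stated in full; the proofs are below) =====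
def Claim_equal_get_itemset : Prop := ∀ (datas : List (List Int)), Dom_get_itemset datas → Spec_get_itemset datas (get_itemset datas)

-- ===== LEMMAS AND PROOFS =====

-- the list of first items of lines with length > 1
def pvFirsts (datas : List (List Int)) : List Int :=
  datas.filterMap (fun line => if 1 < line.length then some line.headI else none)

theorem pvFirsts_cons (line : List Int) (rest : List (List Int)) :
    pvFirsts (line :: rest)
      = (if 1 < line.length then [line.headI] else []) ++ pvFirsts rest := by
  by_cases h : 1 < line.length <;> simp [pvFirsts, h]

-- A's accumulation: nodup, and membership = membership in pvFirsts
theorem pvFoldA (datas : List (List Int)) : ∀ (acc : List Int), acc.Nodup →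
    (datas.foldl (fun acc line =>
        if 1 < line.length then
          if line.headI ∈ acc then acc else acc ++ [line.headI]
        else acc) acc).Nodup ∧
    ∀ x, x ∈ (datas.foldl (fun acc line =>
        if 1 < line.length then
          if line.headI ∈ acc then acc else acc ++ [line.headI]
        else acc) acc) ↔ x ∈ acc ∨ x ∈ pvFirsts datas := by
  induction datas with
  | nil => intro acc h; simpa [pvFirsts] using h
  | cons line rest ih =>
    intro acc hnd
    by_cases hlen : 1 < line.length
    · by_cases hmem : line.headI ∈ acc
      · obtain ⟨h1, h2⟩ := ih acc hnd
        refine ⟨by simpa [hlen, hmem] using h1, fun x => ?_⟩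
        simp only [List.foldl_cons, hlen, if_pos, hmem]
        rw [h2 x, pvFirsts_cons]
        simp only [hlen, if_pos, List.mem_append, List.mem_singleton]
        constructor
        · rintro (h | h)
          · exact Or.inl h
          · exact Or.inr (Or.inr h)
        · rintro (h | rfl | h)
          · exact Or.inl h
          · exact Or.inl hmem
          · exact Or.inr h
      · have hnd' : (acc ++ [line.headI]).Nodup := by
          rw [List.nodup_append]
          refine ⟨hnd, List.nodup_singleton _, ?_⟩
          intro a ha b hb
          simp only [List.mem_singleton] at hb
          subst hb
          exact fun h => hmem (h ▸ ha)
        obtain ⟨h1, h2⟩ := ih (acc ++ [line.headI]) hnd'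
        refine ⟨by simpa [hlen, hmem] using h1, fun x => ?_⟩
        simp only [List.foldl_cons, hlen, if_pos, hmem, if_neg, not_false_iff]
        rw [h2 x, pvFirsts_cons]
        simp only [hlen, if_pos, List.mem_append, List.mem_singleton]
        tauto
    · obtain ⟨h1, h2⟩ := ih acc hnd
      refine ⟨by simpa [hlen] using h1, fun x => ?_⟩
      simp only [List.foldl_cons, hlen, if_neg, not_false_iff]
      rw [h2 x, pvFirsts_cons]
      simp [hlen]

-- ordered insertion preserves strict sortedness and adds exactly x to the members
theorem pvInsert_props (x : Int) : ∀ (acc : List Int), acc.Pairwise (· < ·) →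
    (pvInsert x acc).Pairwise (· < ·) ∧
    ∀ y, y ∈ pvInsert x acc ↔ y = x ∨ y ∈ acc := by
  intro acc
  induction acc with
  | nil => intro _; simp [pvInsert]
  | cons h t ih =>
    intro hp
    have hpt : t.Pairwise (· < ·) := hp.tail
    have hht : ∀ b ∈ t, h < b := fun b hb => List.rel_of_pairwise_cons hp hb
    rcases lt_trichotomy x h with hlt | heq | hgt
    · refine ⟨?_, fun y => ?_⟩
      · simp only [pvInsert, if_pos hlt]
        exact List.Pairwise.cons (by
          intro b hb
          rcases List.mem_cons.mp hb with rfl | hb'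
          · exact hlt
          · exact lt_trans hlt (hht b hb')) hp
      · simp [pvInsert, hlt]
    · subst heq
      refine ⟨?_, fun y => ?_⟩
      · simpa [pvInsert] using hp
      · simp only [pvInsert, lt_irrefl]
        constructor
        · intro hy; exact Or.inr hy
        · rintro (rfl | hy)
          · exact List.mem_cons_self
          · exact hy
    · have hnlt : ¬ x < h := not_lt.mpr (le_of_lt hgt)
      have hne : ¬ x = h := ne_of_gt hgt
      obtain ⟨ih1, ih2⟩ := ih hpt
      refine ⟨?_, fun y => ?_⟩
      · simp only [pvInsert, if_neg hnlt, if_neg hne]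
        refine List.Pairwise.cons ?_ ih1
        intro b hb
        rcases (ih2 b).mp hb with rfl | hb'
        · exact hgt
        · exact hht b hb'
      · simp only [pvInsert, if_neg hnlt, if_neg hne, List.mem_cons]
        rw [ih2 y]
        tauto

-- B's fold: strictly sorted, and membership = membership in pvFirsts
theorem pvFoldB (datas : List (List Int)) : ∀ (acc : List Int), acc.Pairwise (· < ·) →
    (datas.foldl (fun itemset line =>
        if 1 < line.length then pvInsert line.headI itemset else itemset) acc).Pairwise (· < ·) ∧
    ∀ x, x ∈ datas.foldl (fun itemset line =>
        if 1 < line.length then pvInsert line.headI itemset else itemset) acc ↔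
      x ∈ acc ∨ x ∈ pvFirsts datas := by
  induction datas with
  | nil => intro acc hp; simpa [pvFirsts] using hp
  | cons line rest ih =>
    intro acc hp
    by_cases hlen : 1 < line.length
    · obtain ⟨hi1, hi2⟩ := pvInsert_props line.headI acc hp
      obtain ⟨h1, h2⟩ := ih (pvInsert line.headI acc) hi1
      refine ⟨by simpa [hlen] using h1, fun x => ?_⟩
      simp only [List.foldl_cons, hlen, if_pos]
      rw [h2 x, hi2 x, pvFirsts_cons]
      simp only [hlen, if_pos, List.mem_append, List.mem_singleton]
      tauto
    · obtain ⟨h1, h2⟩ := ih acc hp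
      refine ⟨by simpa [hlen] using h1, fun x => ?_⟩
      simp only [List.foldl_cons, hlen, if_neg, not_false_iff]
      rw [h2 x, pvFirsts_cons]
      simp [hlen]

-- ===== VERDICT (by name: the statement is the Claim_ definition above) =====
theorem get_itemset_spec : Claim_equal_get_itemset := by
  intro datas _
  unfold Spec_get_itemset get_itemset get_itemset_alt
  obtain ⟨hanod, hamem⟩ := pvFoldA datas [] (by simp)
  obtain ⟨hbp, hbmem⟩ := pvFoldB datas [] (by simp)
  set L1 := datas.foldl (fun acc line =>
      if 1 < line.length then
        if line.headI ∈ acc then acc else acc ++ [line.headI]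
      else acc) [] with hL1
  set D := datas.foldl (fun itemset line =>
      if 1 < line.length then pvInsert line.headI itemset else itemset) [] with hD
  have hDnod : D.Nodup := hbp.imp ne_of_lt
  have hperm : D.Perm L1 := by
    rw [List.perm_ext_iff_of_nodup hDnod hanod]
    intro a
    rw [hbmem a, hamem a]
  exact PySem.List.sorted_eq_of_perm_of_pairwise_lt (xs := L1) (ys := D) (key := fun x => x) hperm (by simpa using hbp)
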